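-- pv_equiv track=rewrite | github.com/bilgeyucel/advance-analytics | cleaner.py | getRegionClass
-- ===== SOURCE A (Python) =====
-- def getRegionClass(postalCodes):
--     Brussels = []
--     Flanders = []
--     Wallonia = []
--     Other = []
--     for code in postalCodes:
--         # Brussels
--         if ((code >= 1000) and (code <= 1212)) or ((code >= 1931) and (code <= 1950)):
--             Brussels.append(1)
--             Flanders.append(0)
--             Wallonia.append(0)
--             Other.append(0)
--         # Flanders
--         elif ((code >= 1500) and (code <= 4690)) or ((code >= 8000) and (code <= 9999)):
--             Brussels.append(0)
--             Flanders.append(1)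
--             Wallonia.append(0)
--             Other.append(0)
--         # Wallonia
--         elif (code >= 4000) and (code <= 7970):
--             Brussels.append(0)
--             Flanders.append(0)
--             Wallonia.append(1)
--             Other.append(0)
--         # Other
--         else:
--             Brussels.append(0)
--             Flanders.append(0)
--             Wallonia.append(0)
--             Other.append(1)
--     return Brussels, Flanders, Wallonia, Other
-- ===== SOURCE B (Python) =====
-- def _label(code):
--     if ((code >= 1000) and (code <= 1212)) or ((code >= 1931) and (code <= 1950)):
--         return 0
--     elif ((code >= 1500) and (code <= 4690)) or ((code >= 8000) and (code <= 9999)):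
--         return 1
--     elif (code >= 4000) and (code <= 7970):
--         return 2
--     else:
--         return 3
--
-- def getRegionClass(postalCodes):
--     labels = [_label(code) for code in postalCodes]
--     Brussels = [1 if r == 0 else 0 for r in labels]
--     Flanders = [1 if r == 1 else 0 for r in labels]
--     Wallonia = [1 if r == 2 else 0 for r in labels]
--     Other = [1 if r == 3 else 0 for r in labels]
--     return Brussels, Flanders, Wallonia, Other
-- ===== Notes on version B (the rewrite author's own statement) =====
-- stated objective: alternative
-- what changed: Replaces the single interleaved loop that appends to four lists with a classification pass producing a label per code followed by four independent projection passes building the one-hot columns.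
import Mathlib
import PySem

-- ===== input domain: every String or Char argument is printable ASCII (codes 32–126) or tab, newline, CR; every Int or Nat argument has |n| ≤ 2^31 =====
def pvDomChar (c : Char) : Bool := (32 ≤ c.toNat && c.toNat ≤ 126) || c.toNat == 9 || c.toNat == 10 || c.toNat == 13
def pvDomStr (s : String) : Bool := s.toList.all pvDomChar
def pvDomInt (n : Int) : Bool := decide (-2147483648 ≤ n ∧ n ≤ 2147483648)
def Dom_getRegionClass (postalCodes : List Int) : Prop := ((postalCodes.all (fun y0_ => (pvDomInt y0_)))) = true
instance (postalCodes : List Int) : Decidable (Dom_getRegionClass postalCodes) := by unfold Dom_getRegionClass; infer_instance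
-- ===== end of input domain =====

-- ===== PORT A =====
-- A-side helper: the loop body (one iteration of A's for-loop, appending to the four lists).
def stepA (acc : List Int × List Int × List Int × List Int) (code : Int) :
    List Int × List Int × List Int × List Int :=
  if (1000 ≤ code ∧ code ≤ 1212) ∨ (1931 ≤ code ∧ code ≤ 1950) then
    (acc.1 ++ [1], acc.2.1 ++ [0], acc.2.2.1 ++ [0], acc.2.2.2 ++ [0])
  else if (1500 ≤ code ∧ code ≤ 4690) ∨ (8000 ≤ code ∧ code ≤ 9999) then
    (acc.1 ++ [0], acc.2.1 ++ [1], acc.2.2.1 ++ [0], acc.2.2.2 ++ [0])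
  else if 4000 ≤ code ∧ code ≤ 7970 then
    (acc.1 ++ [0], acc.2.1 ++ [0], acc.2.2.1 ++ [1], acc.2.2.2 ++ [0])
  else
    (acc.1 ++ [0], acc.2.1 ++ [0], acc.2.2.1 ++ [0], acc.2.2.2 ++ [1])

def getRegionClass (postalCodes : List Int) : List Int × List Int × List Int × List Int :=
  postalCodes.foldl stepA ([], [], [], [])

-- ===== PORT B =====
def labelOf (code : Int) : Int :=
  if (1000 ≤ code ∧ code ≤ 1212) ∨ (1931 ≤ code ∧ code ≤ 1950) then 0
  else if (1500 ≤ code ∧ code ≤ 4690) ∨ (8000 ≤ code ∧ code ≤ 9999) then 1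
  else if 4000 ≤ code ∧ code ≤ 7970 then 2
  else 3

def getRegionClass_alt (postalCodes : List Int) : List Int × List Int × List Int × List Int :=
  let labels := postalCodes.map labelOf
  (labels.map (fun r => if r = 0 then 1 else 0),
   labels.map (fun r => if r = 1 then 1 else 0),
   labels.map (fun r => if r = 2 then 1 else 0),
   labels.map (fun r => if r = 3 then 1 else 0))

-- ===== PRECONDITION & SPEC =====
def Spec_getRegionClass (postalCodes : List Int) (out : List Int × List Int × List Int × List Int) : Prop := out = getRegionClass_alt postalCodes
instance (postalCodes : List Int) (out : List Int × List Int × List Int × List Int) : Decidable (Spec_getRegionClass postalCodes out) := by unfold Spec_getRegionClass; infer_instance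

-- ===== CLAIM (what is proved, stated in full; the proofs are below) =====
def Claim_equal_getRegionClass : Prop := ∀ (postalCodes : List Int), Dom_getRegionClass postalCodes → Spec_getRegionClass postalCodes (getRegionClass postalCodes)

-- ===== LEMMAS AND PROOFS =====

-- ===== VERDICT (by name: the statement is the Claim_ definition above) =====
theorem foldl_state (postalCodes : List Int) (b f w o : List Int) :
    postalCodes.foldl stepA (b, f, w, o)
    = (b ++ (postalCodes.map labelOf).map (fun r => if r = 0 then 1 else 0),
       f ++ (postalCodes.map labelOf).map (fun r => if r = 1 then 1 else 0),
       w ++ (postalCodes.map labelOf).map (fun r => if r = 2 then 1 else 0),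
       o ++ (postalCodes.map labelOf).map (fun r => if r = 3 then 1 else 0)) := by
  induction postalCodes generalizing b f w o with
  | nil => simp
  | cons c cs ih =>
    by_cases h1 : (1000 ≤ c ∧ c ≤ 1212) ∨ (1931 ≤ c ∧ c ≤ 1950) <;>
    by_cases h2 : (1500 ≤ c ∧ c ≤ 4690) ∨ (8000 ≤ c ∧ c ≤ 9999) <;>
    by_cases h3 : 4000 ≤ c ∧ c ≤ 7970 <;>
      simp [stepA, labelOf, h1, h2, h3, ih]

theorem getRegionClass_spec : Claim_equal_getRegionClass := by
  intro xs _
  unfold Spec_getRegionClass getRegionClass getRegionClass_alt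
  simpa using foldl_state xs [] [] [] []
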